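-- pv_equiv track=rewrite | github.com/wzygxr/shuati | class026_BinarySearch/BinarySearchProblems.py | find_worm_piles
-- ===== SOURCE A (Python) =====
-- def find_worm_piles(piles, queries):
--     """
--     Codeforces 474B - Worms
--     题目来源: https://codeforces.com/problemset/problem/474/B
--
--     题目描述:
--     有n堆虫子，第i堆有a_i条虫子。每条虫子都有一个编号，从1开始连续编号。
--     给出m个查询，每个查询给出一个编号x，问编号为x的虫子属于哪一堆。
--
--     思路分析:
--     1. 使用前缀和数组记录每堆虫子的结束位置
--     2. 对于每个查询，使用二分查找在前缀和数组中查找x所在的位置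
--     3. 找到第一个前缀和大于等于x的位置
--
--     时间复杂度: O(n + m log n)
--     空间复杂度: O(n)
--     是否最优解: 是
--
--     :param piles: 每堆虫子的数量数组
--     :param queries: 查询数组
--     :return: 每个查询对应的堆编号
--     """
--     n, m = len(piles), len(queries)
--
--     # 计算前缀和
--     prefix_sum = [0] * n
--     prefix_sum[0] = piles[0]
--     for i in range(1, n):
--         prefix_sum[i] = prefix_sum[i - 1] + piles[i]
--
--     result = [0] * m
--
--     for i in range(m):
--         x = queries[i]
--
--         # 使用二分查找找到第一个前缀和 >= x 的位置
--         left, right = 0, n - 1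
--         pile_index = -1
--
--         while left <= right:
--             mid = left + ((right - left) >> 1)
--
--             if prefix_sum[mid] >= x:
--                 pile_index = mid
--                 right = mid - 1
--             else:
--                 left = mid + 1
--
--         result[i] = pile_index + 1  # 1-based索引
--
--     return result
-- ===== SOURCE B (Python) =====
-- def _search(prefix, lo, hi, x):
--     # recursive leftmost-candidate binary search; returns -1 if no visited
--     # position has prefix[pos] >= x
--     if lo > hi:
--         return -1
--     mid = lo + ((hi - lo) >> 1)
--     if prefix[mid] >= x:
--         found = _search(prefix, lo, mid - 1, x)
--         return mid if found == -1 else found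
--     return _search(prefix, mid + 1, hi, x)
--
--
-- def find_worm_piles(piles, queries):
--     prefix = []
--     total = 0
--     for a in piles:
--         total += a
--         prefix.append(total)
--     return [_search(prefix, 0, len(prefix) - 1, x) + 1 for x in queries]
-- ===== Notes on version B (the rewrite author's own statement) =====
-- stated objective: alternative
-- what changed: B builds the prefix sums by appending a running total (instead of preallocating [0]*n and assigning by index), answers each query in a comprehension with a recursive binary search that passes the leftmost candidate back up the recursion (instead of A's iterative while-loop tracking pile_index in a mutable variable), so B has no index-assignment loops at all.
import Mathlib
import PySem

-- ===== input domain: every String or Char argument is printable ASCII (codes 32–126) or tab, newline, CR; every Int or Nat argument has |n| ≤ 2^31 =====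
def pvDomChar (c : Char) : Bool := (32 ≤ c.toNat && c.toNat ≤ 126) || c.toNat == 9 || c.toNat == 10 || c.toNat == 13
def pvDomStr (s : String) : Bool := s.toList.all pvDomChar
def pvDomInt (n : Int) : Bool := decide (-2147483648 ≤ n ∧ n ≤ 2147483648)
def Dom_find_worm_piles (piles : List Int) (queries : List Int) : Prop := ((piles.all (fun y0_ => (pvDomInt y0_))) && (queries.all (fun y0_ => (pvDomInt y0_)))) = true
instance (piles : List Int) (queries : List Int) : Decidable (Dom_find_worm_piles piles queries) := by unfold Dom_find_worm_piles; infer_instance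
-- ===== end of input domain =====

-- B replaces A's preallocated arrays, index loops and iterative candidate-tracking
-- while-loop by an appended running-total pfx list, a recursive binary search that
-- passes the candidate back up the recursion, and a comprehension over the queries
-- (objective: alternative decomposition, same results).

-- ===== PORT A =====
-- A's while-loop: state (left, right, pile_index); `(right-left) >> 1` is floor division by 2
def pvALoop (pfx : List Int) (x : Int) (left right pile : Int) : Int :=
  if left ≤ right then
    let mid := left + PySem.Int.floordiv (right - left) 2
    -- prefix_sum[mid]: mid is always in range on the reachable states (Pre_ gives n ≥ 1)
    if PySem.List.pyGetD pfx mid 0 ≥ x then pvALoop pfx x left (mid - 1) mid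
    else pvALoop pfx x (mid + 1) right pile
  else pile
termination_by (right + 1 - left).toNat
decreasing_by
  all_goals (rw [PySem.Int.floordiv_eq_ediv_of_pos (by omega : (0:Int) < 2)] at *; omega)

def find_worm_piles (piles : List Int) (queries : List Int) : List Int :=
  let n : Int := PySem.List.len piles
  let m : Int := PySem.List.len queries
  -- prefix_sum = [0]*n; prefix_sum[0] = piles[0]  (IndexError when piles = []: excluded by Pre_)
  let prefix0 := PySem.List.pySetD (List.replicate n.toNat (0:Int)) 0 (PySem.List.pyGetD piles 0 0)
  let prefixSum := (PySem.List.pyRange 1 n 1).foldl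
    (fun ps i => PySem.List.pySetD ps i (PySem.List.pyGetD ps (i-1) 0 + PySem.List.pyGetD piles i 0)) prefix0
  let result0 := List.replicate m.toNat (0:Int)
  (PySem.List.pyRange 0 m 1).foldl
    (fun res i => PySem.List.pySetD res i (pvALoop prefixSum (PySem.List.pyGetD queries i 0) 0 (n - 1) (-1) + 1))
    result0

-- ===== PORT B =====
-- B's recursive binary search (_search in Source B)
def pvBSearch (pfx : List Int) (x : Int) (lo hi : Int) : Int :=
  if lo > hi then -1
  else
    let mid := lo + PySem.Int.floordiv (hi - lo) 2
    if PySem.List.pyGetD pfx mid 0 ≥ x then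
      let found := pvBSearch pfx x lo (mid - 1)
      if found = -1 then mid else found
    else pvBSearch pfx x (mid + 1) hi
termination_by (hi + 1 - lo).toNat
decreasing_by
  all_goals (rw [PySem.Int.floordiv_eq_ediv_of_pos (by omega : (0:Int) < 2)] at *; omega)

def find_worm_piles_alt (piles : List Int) (queries : List Int) : List Int :=
  let pfx := (piles.foldl (fun (st : List Int × Int) a => (st.1 ++ [st.2 + a], st.2 + a)) ([], 0)).1
  queries.map (fun x => pvBSearch pfx x 0 (PySem.List.len pfx - 1) + 1)

-- ===== PRECONDITION & SPEC =====
-- Pre_ excludes only empty `piles`, where A's `prefix_sum[0] = piles[0]` raises IndexError.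
def Pre_find_worm_piles (piles : List Int) (queries : List Int) : Prop := piles ≠ []
instance (piles : List Int) (queries : List Int) : Decidable (Pre_find_worm_piles piles queries) := by unfold Pre_find_worm_piles; infer_instance
def pvWitness_find_worm_piles : List Int × List Int := ([2, 5, 3], [1, 2, 7, 11, 0])

def Spec_find_worm_piles (piles : List Int) (queries : List Int) (out : List Int) : Prop := out = find_worm_piles_alt piles queries
instance (piles : List Int) (queries : List Int) (out : List Int) : Decidable (Spec_find_worm_piles piles queries out) := by unfold Spec_find_worm_piles; infer_instance

-- ===== CLAIM (what is proved, stated in full; the proofs are below) =====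
def Claim_equal_find_worm_piles : Prop := ∀ (piles : List Int) (queries : List Int), Dom_find_worm_piles piles queries → Pre_find_worm_piles piles queries → Spec_find_worm_piles piles queries (find_worm_piles piles queries)

-- ===== LEMMAS AND PROOFS =====

-- B's running-total fold, in structural form
def pvScan : List Int → Int → List Int
  | [], _ => []
  | a :: l, t => (t + a) :: pvScan l (t + a)

theorem pvScan_spec (l : List Int) (acc : List Int) (t : Int) :
    (l.foldl (fun (st : List Int × Int) a => (st.1 ++ [st.2 + a], st.2 + a)) (acc, t)).1
      = acc ++ pvScan l t := by
  induction l generalizing acc t with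
  | nil => simp [pvScan]
  | cons a l ih => simp [List.foldl_cons, pvScan, ih]

theorem pvScan_length (l : List Int) (t : Int) : (pvScan l t).length = l.length := by
  induction l generalizing t with
  | nil => rfl
  | cons a l ih => simp [pvScan, ih]

theorem pvScan_succ (l : List Int) (t : Int) (k : Nat) (h : k + 1 < l.length) :
    (pvScan l t)[k + 1]'(by simp [pvScan_length]; omega)
      = (pvScan l t)[k]'(by simp [pvScan_length]; omega) + l[k + 1] := by
  induction l generalizing t k with
  | nil => simp at h
  | cons a l ih =>
    cases k with
    | zero =>
      match l, h with
      | b :: l', _ => simp [pvScan]; try ring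
    | succ k' =>
      simp only [pvScan, List.getElem_cons_succ]
      exact ih (t + a) k' (by simpa using h)

-- key loop lemma: A's iterative candidate-tracking loop equals B's recursive search
theorem pvLoop_eq_search (pfx : List Int) (x : Int) :
    ∀ (fuel : Nat) (lo hi acc : Int), (hi + 1 - lo).toNat ≤ fuel → 0 ≤ lo →
      pvALoop pfx x lo hi acc =
        (if pvBSearch pfx x lo hi = -1 then acc else pvBSearch pfx x lo hi) := by
  intro fuel
  induction fuel with
  | zero =>
    intro lo hi acc hf hlo
    rw [pvALoop, pvBSearch]
    simp only [if_neg (by omega : ¬ lo ≤ hi), if_pos (by omega : lo > hi)]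
    simp
  | succ fuel ih =>
    intro lo hi acc hf hlo
    by_cases h : lo ≤ hi
    · rw [pvALoop, pvBSearch]
      have hdiv : PySem.Int.floordiv (hi - lo) 2 = (hi - lo) / 2 :=
        PySem.Int.floordiv_eq_ediv_of_pos (by omega)
      simp only [if_pos h, if_neg (by omega : ¬ lo > hi), hdiv]
      set mid := lo + (hi - lo) / 2 with hmid
      have hb : lo ≤ mid ∧ mid ≤ hi := by omega
      by_cases hp : PySem.List.pyGetD pfx mid 0 ≥ x
      · rw [if_pos hp, if_pos hp, ih lo (mid - 1) mid (by omega) hlo]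
        by_cases hs : pvBSearch pfx x lo (mid - 1) = -1
        · rw [if_pos hs, if_neg (show ¬ mid = -1 by omega)]
        · rw [if_neg hs]; rw [if_neg hs]
      · rw [if_neg hp, if_neg hp]
        exact ih (mid + 1) hi acc (by omega) (by omega)
    · rw [pvALoop, pvBSearch]
      simp only [if_neg h, if_pos (by omega : lo > hi)]
      simp

-- invariant of A's prefix loop: after range(k+1, n) the first k+1 slots hold the prefix sums
theorem pvPrefix_aux (piles : List Int) :
    ∀ (n k : Nat), (k + 1) + n = piles.length →
      (PySem.List.pyRange ((k + 1 : Nat) : Int) (piles.length : Int) 1).foldl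
        (fun ps i => PySem.List.pySetD ps i (PySem.List.pyGetD ps (i-1) 0 + PySem.List.pyGetD piles i 0))
        ((pvScan piles 0).take (k + 1) ++ List.replicate (piles.length - (k + 1)) 0)
        = pvScan piles 0 := by
  intro n
  induction n with
  | zero =>
    intro k hk
    rw [PySem.List.pyRange_one_eq_nil (by exact_mod_cast (by omega : piles.length ≤ k + 1))]
    have hkeq : k + 1 = piles.length := by omega
    have h1 : (pvScan piles 0).length ≤ k + 1 := by rw [pvScan_length piles 0]; omega
    rw [List.take_of_length_le h1]
    simp [hkeq]
  | succ n ihn =>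
    intro k hk
    have hklt : k + 1 < piles.length := by omega
    have hscanlen : (pvScan piles 0).length = piles.length := pvScan_length piles 0
    rw [PySem.List.pyRange_one_cons
      (by exact_mod_cast (by omega : k + 1 < piles.length))]
    rw [List.foldl_cons]
    have hstep : PySem.List.pySetD
        ((pvScan piles 0).take (k + 1) ++ List.replicate (piles.length - (k + 1)) 0)
        ((k + 1 : Nat) : Int)
        (PySem.List.pyGetD ((pvScan piles 0).take (k + 1) ++ List.replicate (piles.length - (k + 1)) 0) (((k + 1 : Nat) : Int) - 1) 0
          + PySem.List.pyGetD piles ((k + 1 : Nat) : Int) 0)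
        = (pvScan piles 0).take (k + 2) ++ List.replicate (piles.length - (k + 2)) 0 := by
      have hc : (((k + 1 : Nat) : Int) - 1) = ((k : Nat) : Int) := by push_cast; ring
      have hg1 : PySem.List.pyGetD
          ((pvScan piles 0).take (k + 1) ++ List.replicate (piles.length - (k + 1)) 0)
          (((k + 1 : Nat) : Int) - 1) 0
          = (pvScan piles 0)[k]'(by omega) := by
        rw [hc, PySem.List.pyGetD_natCast]
        have hk1 : k < ((pvScan piles 0).take (k + 1)).length := by
          simp [hscanlen]; omega
        rw [List.getD_append _ _ _ _ hk1, List.getD_eq_getElem _ 0 hk1]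
        simp [List.getElem_take]
      have hg2 : PySem.List.pyGetD piles ((k + 1 : Nat) : Int) 0 = piles[k+1]'hklt := by
        rw [PySem.List.pyGetD_natCast]
        exact List.getD_eq_getElem piles 0 hklt
      rw [hg1, hg2, PySem.List.pySetD_natCast,
        ← pvScan_succ piles 0 k (by omega)]
      have hrep : List.replicate (piles.length - (k + 1)) (0:Int)
          = 0 :: List.replicate (piles.length - (k + 2)) 0 := by
        have h2 : piles.length - (k + 1) = (piles.length - (k + 2)) + 1 := by omega
        rw [h2, List.replicate_succ]
      rw [hrep]
      have htk : (pvScan piles 0).take (k + 2) =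
          (pvScan piles 0).take (k + 1) ++ [(pvScan piles 0)[k+1]'(by omega)] := by
        have h3 := List.take_succ_eq_append_getElem
          (show k + 1 < (pvScan piles 0).length by omega)
        simpa [show k + 1 + 1 = k + 2 by omega] using h3
      rw [htk, List.append_assoc]
      have hl1 : (List.take (k + 1) (pvScan piles 0)).length = k + 1 := by
        simp [hscanlen]; omega
      rw [List.set_append_right (k + 1) _ (by omega)]
      rw [show k + 1 - (List.take (k + 1) (pvScan piles 0)).length = 0 by omega]
      rw [List.set_cons_zero]
      rfl
    rw [hstep]
    have hc2 : (((k + 1 : Nat) : Int) + 1) = ((k + 2 : Nat) : Int) := by push_cast; ring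
    rw [hc2]
    exact ihn (k + 1) (by omega)

-- the A-side pfx construction equals pvScan piles 0
theorem pvPrefix_eq (piles : List Int) (h : piles ≠ []) :
    (PySem.List.pyRange 1 (PySem.List.len piles) 1).foldl
      (fun ps i => PySem.List.pySetD ps i (PySem.List.pyGetD ps (i-1) 0 + PySem.List.pyGetD piles i 0))
      (PySem.List.pySetD (List.replicate (PySem.List.len piles).toNat (0:Int)) 0 (PySem.List.pyGetD piles 0 0))
      = pvScan piles 0 := by
  match piles, h with
  | p :: rest, _ =>
    have hbase : PySem.List.pySetD (List.replicate (PySem.List.len (p :: rest)).toNat (0:Int)) 0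
        (PySem.List.pyGetD (p :: rest) 0 0)
        = (pvScan (p :: rest) 0).take 1 ++ List.replicate ((p :: rest).length - 1) 0 := by
      simp [PySem.List.pySetD_of_nonneg, PySem.List.pyGetD_zero_cons, PySem.List.len_eq,
        List.replicate_succ, pvScan]
    rw [hbase]
    have := pvPrefix_aux (p :: rest) rest.length 0 (by simp; omega)
    simpa [PySem.List.len_eq] using this

-- invariant of A's result loop: after range(k, m) the first k slots already hold the answers
theorem pvFill_map_aux (qs : List Int) (f : Int → Int) :
    ∀ (n k : Nat), k + n = qs.length →
      (PySem.List.pyRange (k : Int) (qs.length : Int) 1).foldl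
        (fun res i => PySem.List.pySetD res i (f (PySem.List.pyGetD qs i 0)))
        ((qs.take k).map f ++ List.replicate (qs.length - k) 0) = qs.map f := by
  intro n
  induction n with
  | zero =>
    intro k hk
    rw [PySem.List.pyRange_one_eq_nil (by exact_mod_cast (by omega : qs.length ≤ k))]
    have hkeq : k = qs.length := by omega
    subst hkeq
    simp
  | succ n ihn =>
    intro k hk
    have hklt : k < qs.length := by omega
    rw [PySem.List.pyRange_one_cons (by exact_mod_cast (by omega : (k : Int) < (qs.length : Int)))]
    rw [List.foldl_cons]
    have h1 : PySem.List.pyGetD qs (k : Int) 0 = qs[k] := by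
      simp [List.getElem?_eq_getElem hklt]
    have h2 : PySem.List.pySetD ((qs.take k).map f ++ List.replicate (qs.length - k) 0)
        (k : Int) (f (PySem.List.pyGetD qs (k : Int) 0))
        = (qs.take (k+1)).map f ++ List.replicate (qs.length - (k+1)) 0 := by
      rw [h1, PySem.List.pySetD_natCast]
      have hrep : List.replicate (qs.length - k) (0:Int)
          = 0 :: List.replicate (qs.length - (k+1)) 0 := by
        have : qs.length - k = (qs.length - (k+1)) + 1 := by omega
        rw [this, List.replicate_succ]
      rw [hrep, List.take_succ_eq_append_getElem hklt]
      simp [show k - min k qs.length = 0 by omega,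
        List.take_succ_eq_append_getElem (show k < (List.map f qs).length by simpa using hklt)]
    rw [h2]
    have : ((k : Int) + 1) = ((k + 1 : Nat) : Int) := by push_cast; ring
    rw [this]
    exact ihn (k+1) (by omega)

-- the A-side result construction is a map over the queries
theorem pvFill_map (qs : List Int) (f : Int → Int) :
    (PySem.List.pyRange 0 (PySem.List.len qs) 1).foldl
      (fun res i => PySem.List.pySetD res i (f (PySem.List.pyGetD qs i 0)))
      (List.replicate (PySem.List.len qs).toNat (0:Int))
      = qs.map f := by
  have := pvFill_map_aux qs f qs.length 0 (by omega)
  simpa [PySem.List.len_eq] using this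

-- ===== VERDICT (by name: the statement is the Claim_ definition above) =====
theorem find_worm_piles_spec : Claim_equal_find_worm_piles := by
  intro piles queries _ hpre
  unfold Spec_find_worm_piles find_worm_piles find_worm_piles_alt
  dsimp only
  rw [pvFill_map queries (fun x =>
        pvALoop ((PySem.List.pyRange 1 (PySem.List.len piles) 1).foldl
          (fun ps i => PySem.List.pySetD ps i (PySem.List.pyGetD ps (i-1) 0 + PySem.List.pyGetD piles i 0))
          (PySem.List.pySetD (List.replicate (PySem.List.len piles).toNat (0:Int)) 0 (PySem.List.pyGetD piles 0 0)))
          x 0 (PySem.List.len piles - 1) (-1) + 1),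
      pvScan_spec piles [] 0, pvPrefix_eq piles hpre]
  apply List.map_congr_left
  intro x _
  rw [pvLoop_eq_search (pvScan piles 0) x ((PySem.List.len piles - 1) + 1 - 0).toNat 0
        (PySem.List.len piles - 1) (-1) (le_refl _) (le_refl 0)]
  have hlen : PySem.List.len (pvScan piles 0) = PySem.List.len piles := by
    simp [PySem.List.len_eq, pvScan_length]
  rw [List.nil_append, hlen]
  split <;> omega
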